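-- pv_equiv track=rewrite | github.com/miliar/Code_Jam_Webscraper | solutions_python/solutions_year16_round0_nr2/1693.py | solve
-- ===== SOURCE A (Python) =====
-- def flip(S, i):
--     #return [not x if j < i else x for j, x in enumerate(S)]
--     s = [not x for x in S[:i]]
--     s += S[i:]
--     return s
--
-- def solve(S):
--     last = None
--
--     for i, c in enumerate(S):
--         if i is 0:
--             last = c
--             continue
--
--         if c is not last:
--             return solve(flip(S, i)) + 1
--
--     else:
--         return last
-- ===== SOURCE B (Python) =====
-- def solve(S):
--     return sum(a != b for a, b in zip(S, S[1:])) + S[-1]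
-- ===== Notes on version B (the rewrite author's own statement) =====
-- stated objective: faster
-- what changed: A repeatedly flips the prefix at the first mismatch and recurses (each flip copies the list); B does one pass counting adjacent transitions and adds int(S[-1]).
-- outside the precondition, e.g. on solve([]): A returns None, B raises IndexError; on solve([True]): A returns True, B returns 1; on solve([False, False]): A returns False, B returns 0
import Mathlib
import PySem

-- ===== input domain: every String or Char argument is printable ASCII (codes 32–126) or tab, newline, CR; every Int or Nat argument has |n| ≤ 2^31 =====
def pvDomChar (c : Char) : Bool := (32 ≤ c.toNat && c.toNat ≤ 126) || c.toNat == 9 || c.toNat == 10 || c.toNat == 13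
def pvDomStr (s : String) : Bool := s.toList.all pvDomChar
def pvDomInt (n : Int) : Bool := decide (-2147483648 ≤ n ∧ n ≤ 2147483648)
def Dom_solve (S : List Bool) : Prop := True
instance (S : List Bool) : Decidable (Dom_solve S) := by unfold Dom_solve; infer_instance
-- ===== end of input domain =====

-- B replaces A's repeated prefix-flip recursion with a single pass counting adjacent
-- transitions plus int(S[-1]) (asymptotically faster). Pre_ excludes the empty list
-- (A returns None, B raises IndexError) and constant lists, on which A returns the
-- bare bool last (True/False) instead of an int; B returns the int 0/1 there.


-- ===== PORT A =====
-- flip(S, i): negate the prefix S[:i], keep S[i:] (i here is a loop index, 0 ≤ i ≤ len,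
-- so Python's slices are exactly take/drop)
def flipA (S : List Bool) (i : Nat) : List Bool :=
  (S.take i).map (fun x => !x) ++ S.drop i

-- the for-loop of A starting from index i with the current 'last': returns the first
-- enumerate index whose element differs from last (last is only assigned at i = 0)
def loopA (last : Bool) (rest : List Bool) (i : Nat) : Option Nat :=
  match rest with
  | [] => none
  | c :: t => if c ≠ last then some i else loopA last t (i + 1)

-- fuel only makes A's recursion total: fuel = S.length always suffices (proved below);
-- the fuel-0 and [] branches are unreachable under Pre_solve.
def solveFuel : Nat → List Bool → Int
  | _, [] => 0                               -- A returns None on []; excluded by Pre_solve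
  | 0, _ => 0
  | fuel + 1, c :: t =>
    match loopA c t 1 with
    | none => if c then 1 else 0             -- 'return last' (Python bool as int)
    | some i => solveFuel fuel (flipA (c :: t) i) + 1

def solve (S : List Bool) : Int := solveFuel S.length S

-- ===== PORT B =====
-- sum(a != b for a, b in zip(S, S[1:])) + S[-1]; S[-1] on the nonempty lists of
-- Pre_solve is getLast (the none branch is unreachable under Pre_solve)
def solve_alt (S : List Bool) : Int :=
  ((S.zip (S.drop 1)).foldl (fun acc p => acc + (if p.1 ≠ p.2 then (1 : Int) else 0)) 0)
    + (match S.getLast? with | some b => if b then 1 else 0 | none => 0)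

-- ===== PRECONDITION & SPEC =====
-- Pre_ excludes the empty list (A returns None, not an int) and constant lists
-- (A returns the bare bool last, True/False, not an int value); both bool values
-- occurring in S is exactly the complement.
def Pre_solve (S : List Bool) : Prop := true ∈ S ∧ false ∈ S
instance (S : List Bool) : Decidable (Pre_solve S) := by unfold Pre_solve; infer_instance
def pvWitness_solve : List Bool := [true, false, true]

def Spec_solve (S : List Bool) (out : Int) : Prop := out = solve_alt S
instance (S : List Bool) (out : Int) : Decidable (Spec_solve S out) := by unfold Spec_solve; infer_instance

-- ===== CLAIM (what is proved, stated in full; the proofs are below) =====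
def Claim_equal_solve : Prop := ∀ (S : List Bool), Dom_solve S → Pre_solve S → Spec_solve S (solve S)

-- ===== LEMMAS AND PROOFS =====

-- number of adjacent transitions
def transN : List Bool → Nat
  | [] => 0
  | [_] => 0
  | a :: b :: t => (if a ≠ b then 1 else 0) + transN (b :: t)

-- last element as a bit (B's second summand)
def lastB (S : List Bool) : Int :=
  match S.getLast? with | some b => if b then 1 else 0 | none => 0

theorem fold_zip_eq (S : List Bool) (acc : Int) :
    (S.zip (S.drop 1)).foldl (fun acc p => acc + (if p.1 ≠ p.2 then (1 : Int) else 0)) acc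
      = acc + transN S := by
  induction S generalizing acc with
  | nil => simp [transN]
  | cons a t ih =>
    cases t with
    | nil => simp [transN]
    | cons b t2 =>
      simp only [List.drop_succ_cons, List.drop_zero, List.zip_cons_cons, List.foldl_cons]
      rw [show (b :: t2).zip t2 = (b :: t2).zip ((b :: t2).drop 1) from rfl, ih]
      simp only [transN]
      push_cast
      split_ifs <;> ring

theorem solve_alt_eq (S : List Bool) : solve_alt S = (transN S : Int) + lastB S := by
  unfold solve_alt lastB
  rw [fold_zip_eq]
  ring

theorem loopA_none (last : Bool) (t : List Bool) (i : Nat) :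
    loopA last t i = none → ∀ x ∈ t, x = last := by
  induction t generalizing i with
  | nil => simp
  | cons c t ih =>
    intro h x hx
    simp only [loopA] at h
    by_cases hc : c = last
    · rw [if_neg (by simp [hc])] at h
      rcases List.mem_cons.mp hx with rfl | hx
      · exact hc
      · exact ih _ h x hx
    · rw [if_pos hc] at h
      exact (Option.some_ne_none _ h).elim

theorem loopA_some (last : Bool) (t : List Bool) (i j : Nat) :
    loopA last t i = some j →
    ∃ k b, t = List.replicate k last ++ (!last) :: b ∧ j = i + k := by
  induction t generalizing i with
  | nil => simp [loopA]
  | cons c t ih =>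
    intro h
    simp only [loopA] at h
    by_cases hc : c = last
    · rw [if_neg (by simp [hc])] at h
      obtain ⟨k, b, ht, hj⟩ := ih (i + 1) h
      exact ⟨k + 1, b, by simp [hc, ht, List.replicate_succ], by omega⟩
    · rw [if_pos hc] at h
      refine ⟨0, t, ?_, by simpa using h.symm⟩
      have : c = !last := by cases c <;> cases last <;> simp_all
      simp [this]

theorem trans_replicate (m : Nat) (v : Bool) (b : List Bool) :
    transN (List.replicate (m + 1) v ++ b) = transN (v :: b) := by
  induction m with
  | zero => simp
  | succ m ih =>
    rw [show List.replicate (m + 2) v ++ b = v :: (List.replicate (m + 1) v ++ b) by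
      simp [List.replicate_succ]]
    rw [show List.replicate (m + 1) v ++ b = v :: (List.replicate m v ++ b) by
      simp [List.replicate_succ]]
    rw [show transN (v :: (v :: (List.replicate m v ++ b))) =
      transN (v :: (List.replicate m v ++ b)) by simp [transN]]
    rw [show v :: (List.replicate m v ++ b) = List.replicate (m + 1) v ++ b by
      simp [List.replicate_succ]]
    exact ih

theorem last_append (L : List Bool) (v : Bool) (b : List Bool) :
    lastB (L ++ v :: b) = lastB (v :: b) := by
  unfold lastB
  rw [List.getLast?_append]
  cases hx : (v :: b).getLast? with
  | none => simp at hx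
  | some x => simp

theorem trans_lt_length (S : List Bool) (h : S ≠ []) : transN S < S.length := by
  induction S with
  | nil => simp at h
  | cons a t ih =>
    cases t with
    | nil => simp [transN]
    | cons b t2 =>
      have := ih (by simp)
      simp only [transN, List.length_cons] at *
      split <;> omega

theorem solveFuel_eq (fuel : Nat) (S : List Bool) (hne : S ≠ []) (hf : transN S < fuel) :
    solveFuel fuel S = (transN S : Int) + lastB S := by
  induction fuel generalizing S with
  | zero => omega
  | succ fuel ih =>
    match S, hne with
    | c :: t, _ =>
      cases h : loopA c t 1 with
      | none =>
        simp only [solveFuel, h]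
        have hall := loopA_none c t 1 h
        have ht : t = List.replicate t.length c := List.eq_replicate_length.mpr hall
        have hS : c :: t = List.replicate t.length c ++ c :: [] := by
          conv_lhs => rw [ht]
          rw [← List.replicate_succ, List.replicate_succ']
        have h1 : transN (c :: t) = 0 := by
          rw [show c :: t = List.replicate (t.length + 1) c ++ ([] : List Bool) by
            simpa using hS.trans (by rw [← List.replicate_succ'])]
          rw [trans_replicate]
          rfl
        have h2 : lastB (c :: t) = if c then 1 else 0 := by
          rw [hS, last_append]
          simp [lastB]
        rw [h1, h2]
        simp
      | some i =>
        simp only [solveFuel, h]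
        obtain ⟨k, b, ht, hi⟩ := loopA_some c t 1 i h
        have hSfrm : c :: t = List.replicate (k + 1) c ++ (!c) :: b := by
          simp [ht, List.replicate_succ]
        have hlen : (List.replicate (k + 1) c).length = i := by simp; omega
        have hflip : flipA (c :: t) i = List.replicate (k + 1) (!c) ++ (!c) :: b := by
          rw [hSfrm]
          unfold flipA
          rw [List.take_left' hlen, List.drop_left' hlen, List.map_replicate]
        have htransS : transN (c :: t) = 1 + transN ((!c) :: b) := by
          rw [hSfrm, trans_replicate]
          simp only [transN]
          rw [if_pos (by cases c <;> simp)]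
        have htransF : transN (flipA (c :: t) i) = transN ((!c) :: b) := by
          rw [hflip, trans_replicate]
          simp [transN]
        have hlastS : lastB (c :: t) = lastB ((!c) :: b) := by
          rw [hSfrm, last_append]
        have hlastF : lastB (flipA (c :: t) i) = lastB ((!c) :: b) := by
          rw [hflip, last_append]
        have hfne : flipA (c :: t) i ≠ [] := by rw [hflip]; simp
        rw [ih (flipA (c :: t) i) hfne (by omega)]
        rw [htransF, htransS, hlastS, ← hlastF]
        push_cast
        ring

-- ===== VERDICT (by name: the statement is the Claim_ definition above) =====
theorem solve_spec : Claim_equal_solve := by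
  intro S _ hpre
  have hne : S ≠ [] := fun h => by rw [h] at hpre; exact absurd hpre.1 (List.not_mem_nil)
  unfold Spec_solve solve
  rw [solveFuel_eq S.length S hne (trans_lt_length S hne), solve_alt_eq]
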